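-- pv_equiv track=rewrite | github.com/miliar/Code_Jam_Webscraper | solutions_python/Problem_155/2123.py | aria
-- ===== SOURCE A (Python) =====
-- def aria(audience):
--     friends = 0
--     clapping = 0
--     for shyness, people in enumerate(audience):
--         friends_needed = max(shyness - clapping, 0)
--         friends += friends_needed
--         clapping += people
--         clapping += friends_needed
--     return friends
-- ===== SOURCE B (Python) =====
-- def aria(audience):
--     # Pass 1: totals[i] = number of real people with shyness < i (prefix sums).
--     totals = []
--     running = 0
--     for people in audience:
--         totals.append(running)
--         running += people
--     # Pass 2: friends needed = largest deficit shyness - totals[shyness] (at least 0).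
--     best = 0
--     for shyness, total in enumerate(totals):
--         best = max(best, shyness - total)
--     return best
-- ===== Notes on version B (the rewrite author's own statement) =====
-- stated objective: alternative
-- what changed: Replaces A's single feedback loop (hired friends folded back into the clapping count) by two staged passes: first build the list of prefix sums of real people, then take the maximum prefix deficit shyness - prefix[shyness].
import Mathlib
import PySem

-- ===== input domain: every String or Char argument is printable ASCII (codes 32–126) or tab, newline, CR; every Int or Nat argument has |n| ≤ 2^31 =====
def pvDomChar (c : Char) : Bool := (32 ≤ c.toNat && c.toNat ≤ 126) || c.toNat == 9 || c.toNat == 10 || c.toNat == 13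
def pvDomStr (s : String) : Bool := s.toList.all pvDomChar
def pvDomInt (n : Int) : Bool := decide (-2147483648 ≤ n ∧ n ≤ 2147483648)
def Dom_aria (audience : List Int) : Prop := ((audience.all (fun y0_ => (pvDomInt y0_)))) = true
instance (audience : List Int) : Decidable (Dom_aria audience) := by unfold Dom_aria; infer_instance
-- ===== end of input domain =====

-- B rebuilds the answer in two staged passes (prefix-sum list, then max deficit) instead of A's single feedback loop (objective: alternative).

-- ===== PORT A =====
-- single loop over enumerate(audience) with state (friends, clapping); shyness is the running index i
def ariaLoop (xs : List Int) (i friends clapping : Int) : Int :=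
  match xs with
  | [] => friends
  | people :: rest =>
      let friends_needed := max (i - clapping) 0
      ariaLoop rest (i + 1) (friends + friends_needed) (clapping + people + friends_needed)

def aria (audience : List Int) : Int := ariaLoop audience 0 0 0

-- ===== PORT B =====
-- pass 1: list of prefix sums (running total appended before each element is added)
def ariaTotals (xs : List Int) (running : Int) : List Int :=
  match xs with
  | [] => []
  | people :: rest => running :: ariaTotals rest (running + people)

-- pass 2: max deficit shyness - total over enumerate(totals), floored at 0 by best's start value
def ariaBest (totals : List Int) (shyness best : Int) : Int :=
  match totals with
  | [] => best
  | total :: rest => ariaBest rest (shyness + 1) (max best (shyness - total))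

def aria_alt (audience : List Int) : Int := ariaBest (ariaTotals audience 0) 0 0

-- ===== PRECONDITION & SPEC =====
def Spec_aria (audience : List Int) (out : Int) : Prop := out = aria_alt audience
instance (audience : List Int) (out : Int) : Decidable (Spec_aria audience out) := by unfold Spec_aria; infer_instance

-- ===== CLAIM (what is proved, stated in full; the proofs are below) =====
def Claim_equal_aria : Prop := ∀ (audience : List Int), Dom_aria audience → Spec_aria audience (aria audience)

-- ===== LEMMAS AND PROOFS =====
-- Invariant: A's clapping equals the real-people prefix sum plus the friends hired so far,
-- and its friends accumulator matches B's running max of deficits.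
theorem ariaLoop_eq_best (xs : List Int) (i friends s : Int) :
    ariaLoop xs i friends (s + friends) = ariaBest (ariaTotals xs s) i friends := by
  induction xs generalizing i friends s with
  | nil => rfl
  | cons p rest ih =>
    simp only [ariaLoop, ariaTotals, ariaBest]
    have h1 : friends + max (i - (s + friends)) 0 = max friends (i - s) := by omega
    have h2 : s + friends + p + max (i - (s + friends)) 0
        = (s + p) + max friends (i - s) := by omega
    rw [h1, h2, ih]

-- ===== VERDICT (by name: the statement is the Claim_ definition above) =====
theorem aria_spec : Claim_equal_aria := by
  intro audience _
  unfold Spec_aria aria aria_alt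
  simpa using ariaLoop_eq_best audience 0 0 0
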